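-- pv_equiv track=rewrite | github.com/Naplues/CLBI | simple_model.py | call_depth
-- ===== SOURCE A (Python) =====
-- def call_depth(statement):
--     statement = statement.strip('\"')
--     score = 0
--     depth = 0
--     for char in statement:
--         if char == '(':
--             depth += 1
--             score += depth
--         elif char == ')':
--             depth -= 1
--     return score
-- ===== SOURCE B (Python) =====
-- def call_depth(statement):
--     # Staged passes: map chars to deltas, build the running-balance sequence,
--     # then sum the balances at exactly the '(' positions (the balance at a '('
--     # already includes that '(' itself, matching increment-then-add).
--     statement = statement.strip('"')
--     deltas = [1 if c == '(' else (-1 if c == ')' else 0) for c in statement]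
--     balances = []
--     b = 0
--     for d in deltas:
--         b += d
--         balances.append(b)
--     return sum(bal for c, bal in zip(statement, balances) if c == '(')
-- ===== Notes on version B (the rewrite author's own statement) =====
-- stated objective: alternative
-- what changed: Replaced A's single forward loop carrying (score, depth) by staged passes: map each character to a delta, materialise the running-balance sequence, then take a filtered sum of the balances at the '(' positions; the strip('"') prefix is kept.
import Mathlib
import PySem

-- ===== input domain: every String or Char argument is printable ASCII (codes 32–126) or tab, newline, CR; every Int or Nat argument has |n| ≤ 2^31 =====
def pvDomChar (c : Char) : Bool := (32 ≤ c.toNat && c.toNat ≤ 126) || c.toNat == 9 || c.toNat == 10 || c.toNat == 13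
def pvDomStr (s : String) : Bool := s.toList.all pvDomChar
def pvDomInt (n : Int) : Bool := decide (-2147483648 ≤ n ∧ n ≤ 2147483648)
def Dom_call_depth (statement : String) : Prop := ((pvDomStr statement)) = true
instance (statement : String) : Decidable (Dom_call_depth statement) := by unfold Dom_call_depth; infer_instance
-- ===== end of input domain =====

-- B replaces A's single forward (score, depth) loop by staged passes: a delta map,
-- a materialised running-balance list, and a filtered sum at '(' positions;
-- objective: alternative decomposition, same cost.


-- ===== PORT A =====
-- step for A's loop: state = (score, depth)
def pvStepA (p : Int × Int) (c : Char) : Int × Int :=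
  if c = '(' then (p.1 + (p.2 + 1), p.2 + 1)
  else if c = ')' then (p.1, p.2 - 1)
  else p

def call_depth (statement : String) : Int :=
  let s := PySem.Str.stripChars statement "\""
  (s.toList.foldl pvStepA (0, 0)).1

-- ===== PORT B =====
-- the delta of one character
def pvDelta (c : Char) : Int := if c = '(' then 1 else if c = ')' then -1 else 0

-- running-balance list: balances of prefixes, starting from b
def pvBalances : List Int → Int → List Int
  | [], _ => []
  | d :: t, b => (b + d) :: pvBalances t (b + d)

def call_depth_alt (statement : String) : Int :=
  let s := (PySem.Str.stripChars statement "\"").toList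
  let deltas := s.map pvDelta
  let balances := pvBalances deltas 0
  ((s.zip balances).filter (fun p => p.1 = '(')).foldl (fun acc p => acc + p.2) 0

-- ===== PRECONDITION & SPEC =====
def Spec_call_depth (statement : String) (out : Int) : Prop := out = call_depth_alt statement
instance (statement : String) (out : Int) : Decidable (Spec_call_depth statement out) := by unfold Spec_call_depth; infer_instance

-- ===== CLAIM (what is proved, stated in full; the proofs are below) =====
def Claim_equal_call_depth : Prop := ∀ (statement : String), Dom_call_depth statement → Spec_call_depth statement (call_depth statement)

-- ===== LEMMAS AND PROOFS =====
-- pull the initial accumulator out of the filtered-sum fold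
theorem pvFoldAdd (xs : List (Char × Int)) (a : Int) :
    xs.foldl (fun acc p => acc + p.2) a = a + xs.foldl (fun acc p => acc + p.2) 0 := by
  induction xs generalizing a with
  | nil => simp
  | cons x t ih => simp only [List.foldl_cons]; rw [ih (a + x.2), ih (0 + x.2)]; ring

-- Main invariant: A's score from state (s, d) equals s plus B's filtered sum
-- of balances started at d.
theorem pvMain (l : List Char) (s d : Int) :
    (l.foldl pvStepA (s, d)).1
      = s + ((l.zip (pvBalances (l.map pvDelta) d)).filter
              (fun p => p.1 = '(')).foldl (fun acc p => acc + p.2) 0 := by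
  induction l generalizing s d with
  | nil => simp
  | cons c t ih =>
    rw [List.foldl_cons]
    simp only [List.map_cons, pvBalances, List.zip_cons_cons, List.filter_cons]
    by_cases h1 : c = '('
    · simp only [pvStepA, pvDelta, h1, reduceIte, decide_true, List.foldl_cons]
      rw [pvFoldAdd, ih]
      ring
    · by_cases h2 : c = ')'
      · have hd : (decide (')' = '(')) = false := by decide
        simp only [pvStepA, pvDelta, h2, if_neg (show ¬(')' = '(') by decide), hd,
          Bool.false_eq_true, reduceIte]
        rw [ih]
        ring_nf
      · simp only [pvStepA, pvDelta, if_neg h1, if_neg h2, decide_eq_true_eq]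
        simpa using ih s d

-- ===== VERDICT (by name: the statement is the Claim_ definition above) =====
theorem call_depth_spec : Claim_equal_call_depth := by
  intro statement _
  unfold Spec_call_depth call_depth call_depth_alt
  rw [pvMain]
  ring
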